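-- pv_equiv track=rewrite | github.com/RWTH-E3D/CityGTV | validation_Process.py | isPolyCPS
-- ===== SOURCE A (Python) =====
-- def isPolyCPS(polypoints):
--     points = polypoints[:-1] # take out the last point, which is same as the first.
--     seen = []
--     for pt in points:
--         if pt in seen:
--             return True
--         else:
--             seen.append(pt)
--     return False
-- ===== SOURCE B (Python) =====
-- def isPolyCPS(polypoints):
--     pts = sorted(polypoints[:-1])
--     for a, b in zip(pts, pts[1:]):
--         if a == b:
--             return True
--     return False
-- ===== Notes on version B (the rewrite author's own statement) =====
-- stated objective: alternative
-- what changed: Replaces the incremental 'seen'-list membership scan (quadratic) with sort-then-scan: sort polypoints[:-1] and return True iff some adjacent pair of the sorted copy is equal.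
import Mathlib
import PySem

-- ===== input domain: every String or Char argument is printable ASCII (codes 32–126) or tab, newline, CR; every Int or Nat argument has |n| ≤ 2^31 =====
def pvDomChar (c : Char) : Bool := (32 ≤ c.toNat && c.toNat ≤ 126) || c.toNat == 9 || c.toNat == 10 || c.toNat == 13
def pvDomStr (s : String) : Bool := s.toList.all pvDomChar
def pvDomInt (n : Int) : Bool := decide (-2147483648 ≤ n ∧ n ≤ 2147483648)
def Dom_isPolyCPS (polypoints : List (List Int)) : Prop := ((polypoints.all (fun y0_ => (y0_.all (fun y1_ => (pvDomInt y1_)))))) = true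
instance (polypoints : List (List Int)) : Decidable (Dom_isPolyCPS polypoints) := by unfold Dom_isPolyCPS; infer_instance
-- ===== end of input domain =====

-- B replaces A's incremental seen-list membership scan by sort-then-adjacent-scan on polypoints[:-1] (alternative algorithm; return value only).

-- ===== PORT A =====
-- the for-loop with early return and the growing 'seen' accumulator
def pvSeenLoop (seen : List (List Int)) : List (List Int) → Bool
  | [] => false
  | pt :: rest => if pt ∈ seen then true else pvSeenLoop (seen ++ [pt]) rest

def isPolyCPS (polypoints : List (List Int)) : Bool :=
  pvSeenLoop [] (PySem.List.slice polypoints none (some (-1)))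

-- ===== PORT B =====
-- the zip(pts, pts[1:]) loop with early return
def pvAdjLoop : List (List Int) → Bool
  | a :: b :: rest => if a = b then true else pvAdjLoop (b :: rest)
  | _ => false

def isPolyCPS_alt (polypoints : List (List Int)) : Bool :=
  pvAdjLoop (@PySem.List.sorted (List Int) (List Int) List.instLinearOrder.toLT
    LinearOrder.toDecidableLT (PySem.List.slice polypoints none (some (-1))) (fun x => x) false)

-- ===== PRECONDITION & SPEC =====
def Spec_isPolyCPS (polypoints : List (List Int)) (out : Bool) : Prop := out = isPolyCPS_alt polypoints
instance (polypoints : List (List Int)) (out : Bool) : Decidable (Spec_isPolyCPS polypoints out) := by unfold Spec_isPolyCPS; infer_instance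

-- ===== CLAIM (what is proved, stated in full; the proofs are below) =====
def Claim_equal_isPolyCPS : Prop := ∀ (polypoints : List (List Int)), Dom_isPolyCPS polypoints → Spec_isPolyCPS polypoints (isPolyCPS polypoints)

-- ===== LEMMAS AND PROOFS =====

theorem pvSeenLoop_eq_true_iff (l seen : List (List Int)) (hs : seen.Nodup) :
    pvSeenLoop seen l = true ↔ ¬ (seen ++ l).Nodup := by
  induction l generalizing seen with
  | nil => simp [pvSeenLoop, hs]
  | cons pt rest ih =>
    by_cases hmem : pt ∈ seen
    · simp only [pvSeenLoop, hmem, if_true]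
      constructor
      · intro _ hnd
        exact (List.disjoint_of_nodup_append hnd) hmem List.mem_cons_self
      · intro _; trivial
    · have hs' : (seen ++ [pt]).Nodup := by
        simp only [List.nodup_append, List.nodup_cons, List.nodup_nil, and_true, List.mem_singleton]
        refine ⟨hs, List.not_mem_nil, fun a ha b hb hab => hmem ?_⟩
        rw [hab, hb] at ha; exact ha
      simp only [pvSeenLoop, hmem, if_false]
      rw [ih (seen ++ [pt]) hs']
      constructor
      · intro h hnd
        exact h (by simpa [List.append_assoc] using hnd)
      · intro h hnd
        exact h (by simpa [List.append_assoc] using hnd)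

theorem pvAdjLoop_eq_true_iff (l : List (List Int)) (hp : l.Pairwise (· ≤ ·)) :
    pvAdjLoop l = true ↔ ¬ l.Nodup := by
  induction l with
  | nil => simp [pvAdjLoop]
  | cons a t ih =>
    cases t with
    | nil => simp [pvAdjLoop]
    | cons b rest =>
      have hp' : (b :: rest).Pairwise (· ≤ ·) := hp.tail
      by_cases hab : a = b
      · subst hab
        simp [pvAdjLoop]
      · simp only [pvAdjLoop, hab, if_false]
        rw [ih hp']
        have hnotmem : a ∉ b :: rest := by
          intro hmem
          rcases List.mem_cons.1 hmem with h | h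
          · exact hab h
          · have h1 : a ≤ b := (List.pairwise_cons.1 hp).1 b List.mem_cons_self
            have h2 : b ≤ a := (List.pairwise_cons.1 hp').1 a h
            exact hab (le_antisymm h1 h2)
        constructor
        · intro h hnd; exact h hnd.tail
        · intro h hnd; exact h (List.nodup_cons.2 ⟨hnotmem, hnd⟩)

-- ===== VERDICT (by name: the statement is the Claim_ definition above) =====
theorem isPolyCPS_spec : Claim_equal_isPolyCPS := by
  intro polypoints _
  unfold Spec_isPolyCPS isPolyCPS isPolyCPS_alt
  set pts := PySem.List.slice polypoints none (some (-1)) with hpts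
  have hA := pvSeenLoop_eq_true_iff pts [] List.nodup_nil
  have hB := pvAdjLoop_eq_true_iff
    (@PySem.List.sorted (List Int) (List Int) List.instLinearOrder.toLT
      LinearOrder.toDecidableLT pts (fun x => x) false)
    (PySem.List.sorted_pairwise pts (fun x => x))
  have hperm : (@PySem.List.sorted (List Int) (List Int) List.instLinearOrder.toLT
      LinearOrder.toDecidableLT pts (fun x => x) false).Perm pts :=
    @PySem.List.sorted_perm (List Int) (List Int) List.instLinearOrder.toLT
      LinearOrder.toDecidableLT pts (fun x => x) false
  rw [Bool.eq_iff_iff, hA, hB, hperm.nodup_iff]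
  simp
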